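-- pv_equiv track=rewrite | github.com/atheiste/LiU-TextMining | Lab5/Lab5-2.py | has_trigrams_feats
-- ===== SOURCE A (Python) =====
-- def has_trigrams_feats(document, trigr):
--     '''Produces binary features "has('word1','word2','word3'): <true|false>" '''
--     features = {}
--     for t in trigr:
--         found = False
--         for i in range(1,len(document)):
--             if ((document[i-2],document[i-1],document[i]) == t):
--                 found = True
--                 break
--         features['has(%s)' % str(t)] = found
--     return features
-- ===== SOURCE B (Python) =====
-- def has_trigrams_feats(document, trigr):
--     '''Produces binary features "has('word1','word2','word3'): <true|false>" '''
--     present = set(zip(document, document[1:], document[2:]))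
--     return {'has(%s)' % str(t): t in present for t in trigr}
-- ===== Notes on version B (the rewrite author's own statement) =====
-- stated objective: faster
-- what changed: Replaces the nested scan (for each query trigram, rescan the whole document with index arithmetic) by a single zip pass that builds the set of trigrams present once, then a dict comprehension answering each query by set membership; this also drops A's negative-index wraparound at i=1, stated as D_.
-- intended difference: On documents of length >= 2 where the wraparound triple (document[-1], document[0], document[1]) equals a queried trigram that does not genuinely occur in the document, A returns True for that trigram (document[i-2] at i=1 wraps to the last element) while B returns False, the intended answer for 'which trigrams appear in the document'. — e.g. on has_trigrams_feats(["a", "b"], [("b", "a", "b")]): A returns [("has(('b', 'a', 'b'))", true)], B returns [("has(('b', 'a', 'b'))", false)]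
import Mathlib
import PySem

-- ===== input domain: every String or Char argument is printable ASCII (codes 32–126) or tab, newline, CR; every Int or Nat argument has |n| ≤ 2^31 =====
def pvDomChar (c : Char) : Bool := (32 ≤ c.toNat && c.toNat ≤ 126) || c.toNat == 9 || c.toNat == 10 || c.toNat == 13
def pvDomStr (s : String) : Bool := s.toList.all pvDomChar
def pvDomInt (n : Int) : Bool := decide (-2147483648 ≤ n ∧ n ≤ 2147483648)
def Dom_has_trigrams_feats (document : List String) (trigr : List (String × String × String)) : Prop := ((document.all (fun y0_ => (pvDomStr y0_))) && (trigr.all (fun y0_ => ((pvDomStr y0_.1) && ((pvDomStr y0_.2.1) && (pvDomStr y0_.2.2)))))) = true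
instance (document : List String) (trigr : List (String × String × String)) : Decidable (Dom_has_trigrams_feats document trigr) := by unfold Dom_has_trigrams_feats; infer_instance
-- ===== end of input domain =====

-- B replaces A's nested scan (for each query trigram, rescan the whole document) by one zip pass
-- building the set of trigrams present, then a dict comprehension; at i = 1 A's document[i-2] is
-- the Python negative-index wraparound document[-1], which B intentionally does not reproduce (D_ below).

-- ===== PORT A =====
-- shared formatting helper: CPython repr of an ASCII str (quote choice + escapes), used by 'has(%s)' % str(t)
def pvEscChar (q c : Char) : List Char :=
  if c = '\\' then ['\\', '\\']
  else if c = q then ['\\', q]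
  else if c = '\t' then ['\\', 't']
  else if c = '\n' then ['\\', 'n']
  else if c = '\r' then ['\\', 'r']
  else [c]

def pvReprStr (s : String) : List Char :=
  let cs := s.toList
  let q : Char := if cs.contains '\'' && !(cs.contains '"') then '"' else '\''
  q :: cs.flatMap (pvEscChar q) ++ [q]

-- 'has(%s)' % str(t)  for a 3-tuple of strings
def pvKey (t : String × String × String) : String :=
  String.ofList ("has((".toList ++ pvReprStr t.1 ++ ", ".toList ++ pvReprStr t.2.1 ++
             ", ".toList ++ pvReprStr t.2.2 ++ "))".toList)

-- A's inner loop: 'for i in range(1, len(document)): if (...) == t: found = True; break'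
def pvScanA (document : List String) (t : String × String × String) : List Int → Bool
  | [] => false
  | i :: rest =>
      if (PySem.List.pyGet? document (i - 2), PySem.List.pyGet? document (i - 1),
          PySem.List.pyGet? document i) = (some t.1, some t.2.1, some t.2.2) then
        true
      else pvScanA document t rest

def has_trigrams_feats (document : List String) (trigr : List (String × String × String)) : List (String × Bool) :=
  (trigr.foldl
    (fun (features : PySem.Dict String Bool) t =>
      features.insert (pvKey t) (pvScanA document t (PySem.List.pyRange 1 (document.length : Int) 1)))
    PySem.Dict.empty).items

-- ===== PORT B =====
-- zip(document, document[1:], document[2:])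
def pvZip3 {α β γ : Type} : List α → List β → List γ → List (α × β × γ)
  | a :: as, b :: bs, c :: cs => (a, b, c) :: pvZip3 as bs cs
  | _, _, _ => []

-- present = set(zip(document, document[1:], document[2:]))
def pvPresent (document : List String) : PySem.Set (String × String × String) :=
  PySem.Set.ofList (pvZip3 document (PySem.List.slice document (some 1) none)
                                    (PySem.List.slice document (some 2) none))

def has_trigrams_feats_alt (document : List String) (trigr : List (String × String × String)) : List (String × Bool) :=
  let present := pvPresent document
  (trigr.foldl
    (fun (features : PySem.Dict String Bool) t =>
      features.insert (pvKey t) (PySem.Set.contains present t))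
    PySem.Dict.empty).items

-- ===== PRECONDITION & SPEC =====
-- On documents of length ≥ 2 whose wraparound triple (document[-1], document[0], document[1]) equals some
-- queried trigram that does not actually occur in the document, A wrongly reports that trigram as present
-- (True) because document[i-2] at i = 1 wraps to the last element; B reports False, the intended answer.
def D_has_trigrams_feats (document : List String) (trigr : List (String × String × String)) : Prop :=
  2 ≤ document.length ∧ ∃ t ∈ trigr,
    t = (document.getLastD "", document.getD 0 "", document.getD 1 "") ∧
    ¬ ∃ k ∈ List.range document.length, k + 2 < document.length ∧
        (document.getD k "", document.getD (k + 1) "", document.getD (k + 2) "") = t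
instance (document : List String) (trigr : List (String × String × String)) : Decidable (D_has_trigrams_feats document trigr) := by unfold D_has_trigrams_feats; infer_instance

def Spec_has_trigrams_feats (document : List String) (trigr : List (String × String × String)) (out : List (String × Bool)) : Prop := ¬ D_has_trigrams_feats document trigr → out = has_trigrams_feats_alt document trigr
instance (document : List String) (trigr : List (String × String × String)) (out : List (String × Bool)) : Decidable (Spec_has_trigrams_feats document trigr out) := by unfold Spec_has_trigrams_feats; infer_instance

def pvDiffWitness_has_trigrams_feats : List String × (List (String × String × String)) :=
  (["a", "b"], [("b", "a", "b")])

def pvDiffWitnessOut_has_trigrams_feats : (List (String × Bool)) × (List (String × Bool)) :=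
  ([("has(('b', 'a', 'b'))", true)], [("has(('b', 'a', 'b'))", false)])

-- ===== CLAIM (what is proved, stated in full; the proofs are below) =====
def Claim_unchanged_has_trigrams_feats : Prop := ∀ (document : List String) (trigr : List (String × String × String)), Dom_has_trigrams_feats document trigr → Spec_has_trigrams_feats document trigr (has_trigrams_feats document trigr)

def Claim_changed_has_trigrams_feats : Prop := Dom_has_trigrams_feats (pvDiffWitness_has_trigrams_feats.1) (pvDiffWitness_has_trigrams_feats.2) ∧ D_has_trigrams_feats (pvDiffWitness_has_trigrams_feats.1) (pvDiffWitness_has_trigrams_feats.2) ∧ has_trigrams_feats (pvDiffWitness_has_trigrams_feats.1) (pvDiffWitness_has_trigrams_feats.2) = pvDiffWitnessOut_has_trigrams_feats.1 ∧ has_trigrams_feats_alt (pvDiffWitness_has_trigrams_feats.1) (pvDiffWitness_has_trigrams_feats.2) = pvDiffWitnessOut_has_trigrams_feats.2 ∧ pvDiffWitnessOut_has_trigrams_feats.1 ≠ pvDiffWitnessOut_has_trigrams_feats.2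

def Claim_exact_has_trigrams_feats : Prop := ∀ (document : List String) (trigr : List (String × String × String)), Dom_has_trigrams_feats document trigr → D_has_trigrams_feats document trigr → has_trigrams_feats document trigr ≠ has_trigrams_feats_alt document trigr

-- ===== LEMMAS AND PROOFS =====

lemma pvScanA_eq_any (d : List String) (t : String × String × String) (is : List Int) :
    pvScanA d t is = is.any (fun i =>
      decide ((PySem.List.pyGet? d (i - 2), PySem.List.pyGet? d (i - 1), PySem.List.pyGet? d i)
        = (some t.1, some t.2.1, some t.2.2))) := by
  induction is with
  | nil => rfl
  | cons i rest ih =>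
      simp only [pvScanA, List.any_cons]
      split_ifs with h
      · simp [h]
      · simp [h, ih]

lemma mem_pvZip3 {α β γ : Type} (as : List α) (bs : List β) (cs : List γ) (t : α × β × γ) :
    t ∈ pvZip3 as bs cs ↔
      ∃ k : Nat, as[k]? = some t.1 ∧ bs[k]? = some t.2.1 ∧ cs[k]? = some t.2.2 := by
  induction as generalizing bs cs with
  | nil => simp [pvZip3]
  | cons a as ih =>
      cases bs with
      | nil => simp [pvZip3]
      | cons b bs =>
          cases cs with
          | nil => simp [pvZip3]
          | cons c cs =>
              simp only [pvZip3, List.mem_cons, ih]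
              constructor
              · rintro (rfl | ⟨k, h1, h2, h3⟩)
                · exact ⟨0, by simp⟩
                · exact ⟨k + 1, by simpa using h1, by simpa using h2, by simpa using h3⟩
              · rintro ⟨k, h1, h2, h3⟩
                cases k with
                | zero =>
                    left
                    simp only [List.getElem?_cons_zero, Option.some.injEq] at h1 h2 h3
                    obtain ⟨x, y, z⟩ := t
                    simp_all
                | succ k =>
                    right
                    exact ⟨k, by simpa using h1, by simpa using h2, by simpa using h3⟩

-- B's flag for t is membership in the genuine-trigram list
lemma contains_pvPresent (d : List String) (t : String × String × String) :
    PySem.Set.contains (pvPresent d) t = true ↔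
      ∃ k : Nat, d[k]? = some t.1 ∧ d[k + 1]? = some t.2.1 ∧ d[k + 2]? = some t.2.2 := by
  rw [pvPresent, PySem.Set.contains_iff, PySem.Set.mem_ofList,
      (by simp [pysem] : PySem.List.slice d (some 1) none = d.drop 1),
      (by simp [pysem] : PySem.List.slice d (some 2) none = d.drop 2), mem_pvZip3]
  constructor
  · rintro ⟨k, h1, h2, h3⟩
    refine ⟨k, h1, ?_, ?_⟩
    · rw [List.getElem?_drop] at h2; simpa [Nat.add_comm] using h2
    · rw [List.getElem?_drop] at h3; simpa [Nat.add_comm] using h3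
  · rintro ⟨k, h1, h2, h3⟩
    refine ⟨k, h1, ?_, ?_⟩
    · rw [List.getElem?_drop]; simpa [Nat.add_comm] using h2
    · rw [List.getElem?_drop]; simpa [Nat.add_comm] using h3

-- the per-trigram flags agree outside the wraparound situation
lemma flag_eq (d : List String) (t : String × String × String)
    (hyp : 2 ≤ d.length → t = (d.getLastD "", d.getD 0 "", d.getD 1 "") →
      ∃ k ∈ List.range d.length, k + 2 < d.length ∧
        (d.getD k "", d.getD (k + 1) "", d.getD (k + 2) "") = t) :
    pvScanA d t (PySem.List.pyRange 1 (d.length : Int) 1) = PySem.Set.contains (pvPresent d) t := by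
  obtain ⟨x, y, z⟩ := t
  rw [Bool.eq_iff_iff, pvScanA_eq_any, List.any_eq_true, contains_pvPresent]
  constructor
  · rintro ⟨i, hmem, hp⟩
    rw [PySem.List.mem_pyRange_one] at hmem
    rw [decide_eq_true_eq, Prod.mk.injEq, Prod.mk.injEq] at hp
    obtain ⟨h1, h2, h3⟩ := hp
    by_cases hi : i = 1
    · -- wraparound hit: use hyp
      subst hi
      have hlen : 2 ≤ d.length := by omega
      rw [show (1 : Int) - 2 = -1 by norm_num, PySem.List.pyGet?_neg_one] at h1
      rw [show (1 : Int) - 1 = ((0 : Nat) : Int) by norm_num, PySem.List.pyGet?_natCast] at h2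
      rw [show (1 : Int) = ((1 : Nat) : Int) by norm_num, PySem.List.pyGet?_natCast] at h3
      have hwrap : ((x, y, z) : String × String × String)
          = (d.getLastD "", d.getD 0 "", d.getD 1 "") := by
        rw [List.getLastD_eq_getLast?, h1, List.getD_eq_getElem?_getD, h2,
            List.getD_eq_getElem?_getD, h3]
        rfl
      obtain ⟨k, -, hk2, hkt⟩ := hyp hlen hwrap
      rw [Prod.mk.injEq, Prod.mk.injEq] at hkt
      obtain ⟨hk1', hk2', hk3'⟩ := hkt
      refine ⟨k, ?_, ?_, ?_⟩
      · rw [← hk1', List.getD_eq_getElem d "" (by omega), List.getElem?_eq_getElem (by omega)]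
      · rw [← hk2', List.getD_eq_getElem d "" (by omega), List.getElem?_eq_getElem (by omega)]
      · rw [← hk3', List.getD_eq_getElem d "" (by omega), List.getElem?_eq_getElem (by omega)]
    · -- a genuine trigram at index i ≥ 2
      have hi2 : 2 ≤ i := by omega
      rw [PySem.List.pyGet?_of_nonneg (xs := d) (i := i - 2) (by omega)] at h1
      rw [PySem.List.pyGet?_of_nonneg (xs := d) (i := i - 1) (by omega)] at h2
      rw [PySem.List.pyGet?_of_nonneg (xs := d) (i := i) (by omega)] at h3
      refine ⟨(i - 2).toNat, h1, ?_, ?_⟩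
      · rwa [show (i - 1).toNat = (i - 2).toNat + 1 by omega] at h2
      · rwa [show i.toNat = (i - 2).toNat + 2 by omega] at h3
  · rintro ⟨k, h1, h2, h3⟩
    have hk2 : k + 2 < d.length := by
      obtain ⟨h, -⟩ := List.getElem?_eq_some_iff.mp h3
      omega
    refine ⟨(k : Int) + 2, ?_, ?_⟩
    · rw [PySem.List.mem_pyRange_one]; omega
    · rw [decide_eq_true_eq, Prod.mk.injEq, Prod.mk.injEq]
      refine ⟨?_, ?_, ?_⟩
      · rw [show (k : Int) + 2 - 2 = ((k : Nat) : Int) by ring, PySem.List.pyGet?_natCast]; exact h1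
      · rw [show (k : Int) + 2 - 1 = ((k + 1 : Nat) : Int) by push_cast; ring, PySem.List.pyGet?_natCast]; exact h2
      · rw [show (k : Int) + 2 = ((k + 2 : Nat) : Int) by push_cast; ring, PySem.List.pyGet?_natCast]; exact h3

-- ---- proof-only helpers: a decoder showing the 'has(%s)' keys are injective ----

def pvDecEsc (x : Char) : Char :=
  if x = 't' then '\t' else if x = 'n' then '\n' else if x = 'r' then '\r' else x

def pvDecode1 (q : Char) : List Char → Option (List Char × List Char)
  | [] => none
  | c :: rest =>
      if c = '\\' then
        match rest with
        | [] => none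
        | x :: rest' => (pvDecode1 q rest').map (fun p => (pvDecEsc x :: p.1, p.2))
      else if c = q then some ([], rest)
      else (pvDecode1 q rest).map (fun p => (c :: p.1, p.2))

def pvDecodeRepr : List Char → Option (List Char × List Char)
  | [] => none
  | q :: rest => pvDecode1 q rest

lemma pvDecode1_quote (q : Char) (hqb : q ≠ '\\') (rest : List Char) :
    pvDecode1 q (q :: rest) = some ([], rest) := by
  conv_lhs => unfold pvDecode1
  rw [if_neg hqb, if_pos rfl]

lemma pvDecode1_esc (q x : Char) (rest : List Char) :
    pvDecode1 q ('\\' :: x :: rest) = (pvDecode1 q rest).map (fun p => (pvDecEsc x :: p.1, p.2)) := by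
  conv_lhs => unfold pvDecode1
  rw [if_pos rfl]

lemma pvDecode1_plain (q c : Char) (hb : c ≠ '\\') (hc : c ≠ q) (rest : List Char) :
    pvDecode1 q (c :: rest) = (pvDecode1 q rest).map (fun p => (c :: p.1, p.2)) := by
  conv_lhs => unfold pvDecode1
  rw [if_neg hb, if_neg hc]

lemma pvDecode1_roundtrip (q : Char) (hq : q = '\'' ∨ q = '"') (cs rest : List Char) :
    pvDecode1 q (cs.flatMap (pvEscChar q) ++ q :: rest) = some (cs, rest) := by
  have hqb : q ≠ '\\' := by rcases hq with rfl | rfl <;> decide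
  have hqt : pvDecEsc q = q := by rcases hq with rfl | rfl <;> decide
  induction cs with
  | nil => rw [List.flatMap_nil, List.nil_append, pvDecode1_quote q hqb]
  | cons c cs ih =>
      rw [List.flatMap_cons, List.append_assoc]
      by_cases hb : c = '\\'
      · subst hb
        have he : pvEscChar q '\\' = ['\\', '\\'] := by unfold pvEscChar; rw [if_pos rfl]
        rw [he, List.cons_append, List.cons_append, List.nil_append, pvDecode1_esc, ih]
        rfl
      · by_cases hc : c = q
        · subst hc
          have he : pvEscChar c c = ['\\', c] := by unfold pvEscChar; rw [if_neg hb, if_pos rfl]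
          rw [he, List.cons_append, List.cons_append, List.nil_append, pvDecode1_esc, ih, hqt]
          rfl
        · by_cases ht : c = '\t'
          · subst ht
            have he : pvEscChar q '\t' = ['\\', 't'] := by
              unfold pvEscChar; rw [if_neg hb, if_neg hc, if_pos rfl]
            rw [he, List.cons_append, List.cons_append, List.nil_append, pvDecode1_esc, ih]
            rfl
          · by_cases hn : c = '\n'
            · subst hn
              have he : pvEscChar q '\n' = ['\\', 'n'] := by
                unfold pvEscChar; rw [if_neg hb, if_neg hc, if_neg ht, if_pos rfl]
              rw [he, List.cons_append, List.cons_append, List.nil_append, pvDecode1_esc, ih]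
              rfl
            · by_cases hr : c = '\r'
              · subst hr
                have he : pvEscChar q '\r' = ['\\', 'r'] := by
                  unfold pvEscChar; rw [if_neg hb, if_neg hc, if_neg ht, if_neg hn, if_pos rfl]
                rw [he, List.cons_append, List.cons_append, List.nil_append, pvDecode1_esc, ih]
                rfl
              · have he : pvEscChar q c = [c] := by
                  unfold pvEscChar; rw [if_neg hb, if_neg hc, if_neg ht, if_neg hn, if_neg hr]
                rw [he, List.cons_append, List.nil_append, pvDecode1_plain q c hb hc, ih]
                rfl

lemma pvDecodeRepr_roundtrip (s : String) (rest : List Char) :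
    pvDecodeRepr (pvReprStr s ++ rest) = some (s.toList, rest) := by
  unfold pvReprStr
  by_cases h : (s.toList.contains '\'' && !(s.toList.contains '"')) = true
  · simp only [h, if_pos]
    show pvDecodeRepr ('"' :: (s.toList.flatMap (pvEscChar '"') ++ ['"']) ++ rest) = _
    simp only [pvDecodeRepr, List.cons_append, List.append_assoc]
    exact pvDecode1_roundtrip '"' (Or.inr rfl) s.toList rest
  · simp only [h, if_neg, Bool.not_eq_true]
    show pvDecodeRepr ('\'' :: (s.toList.flatMap (pvEscChar '\'') ++ ['\'']) ++ rest) = _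
    simp only [pvDecodeRepr, List.cons_append, List.append_assoc]
    exact pvDecode1_roundtrip '\'' (Or.inl rfl) s.toList rest

lemma pvKey_inj (t t' : String × String × String) (h : pvKey t = pvKey t') : t = t' := by
  obtain ⟨a, b, c⟩ := t
  obtain ⟨a', b', c'⟩ := t'
  have hl := congrArg String.toList h
  simp only [pvKey, String.toList_ofList, List.append_assoc] at hl
  have h5 := congrArg (List.drop 5) hl
  simp only [show ("has((".toList : List Char) = ['h','a','s','(','('] from rfl,
    List.cons_append, List.nil_append, List.drop_succ_cons, List.drop_zero] at h5
  have e1 := pvDecodeRepr_roundtrip a (", ".toList ++ (pvReprStr b ++ (", ".toList ++ (pvReprStr c ++ "))".toList))))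
  have e1' := pvDecodeRepr_roundtrip a' (", ".toList ++ (pvReprStr b' ++ (", ".toList ++ (pvReprStr c' ++ "))".toList))))
  rw [h5] at e1
  rw [e1'] at e1
  simp only [Option.some.injEq, Prod.mk.injEq] at e1
  obtain ⟨ha, hrest⟩ := e1
  have haeq : a = a' := by
    have := congrArg String.ofList ha.symm
    simpa [String.ofList_toList] using this
  simp only [show (", ".toList : List Char) = [',', ' '] from rfl, List.cons_append,
    List.nil_append, List.cons.injEq, true_and] at hrest
  have e2 := pvDecodeRepr_roundtrip b (", ".toList ++ (pvReprStr c ++ "))".toList))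
  have e2' := pvDecodeRepr_roundtrip b' (", ".toList ++ (pvReprStr c' ++ "))".toList))
  simp only [show (", ".toList : List Char) = [',', ' '] from rfl, List.cons_append,
    List.nil_append] at e2 e2'
  rw [hrest] at e2'
  rw [e2] at e2'
  simp only [Option.some.injEq, Prod.mk.injEq, List.cons.injEq, true_and] at e2'
  obtain ⟨hb, hrest2⟩ := e2'
  have hbeq : b = b' := by
    have := congrArg String.ofList hb
    simpa [String.ofList_toList] using this
  have e3 := pvDecodeRepr_roundtrip c ("))".toList)
  have e3' := pvDecodeRepr_roundtrip c' ("))".toList)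
  rw [hrest2] at e3
  rw [e3'] at e3
  simp only [Option.some.injEq, Prod.mk.injEq] at e3
  have hceq : c = c' := by
    have := congrArg String.ofList e3.1.symm
    simpa [String.ofList_toList] using this
  simp [haeq, hbeq, hceq]

-- the final value stored at key t0's key, when no other element of the list shares that key
lemma pvGetD_foldl_insert_untouched {α κ ν : Type} [BEq κ] [LawfulBEq κ]
    (l : List α) (key : α → κ) (f : α → ν) (k : κ) (dflt : ν)
    (hk : ∀ a ∈ l, key a ≠ k) (d : PySem.Dict κ ν) :
    (l.foldl (fun d a => d.insert (key a) (f a)) d).getD k dflt = d.getD k dflt := by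
  induction l generalizing d with
  | nil => rfl
  | cons a l ih =>
      simp only [List.foldl_cons]
      rw [ih (fun x hx => hk x (List.mem_cons_of_mem _ hx)),
          PySem.Dict.getD_insert_of_ne _ _ _ (fun h => hk a (List.mem_cons_self) (by simp [h]))]

lemma pvGetD_foldl_insert_unique {α κ ν : Type} [BEq κ] [LawfulBEq κ]
    (l : List α) (key : α → κ) (f : α → ν) (t0 : α) (dflt : ν)
    (hmem : t0 ∈ l) (hinj : ∀ a ∈ l, key a = key t0 → a = t0) (d : PySem.Dict κ ν) :
    (l.foldl (fun d a => d.insert (key a) (f a)) d).getD (key t0) dflt = f t0 := by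
  induction l generalizing d with
  | nil => cases hmem
  | cons a l ih =>
      simp only [List.foldl_cons]
      by_cases hmem' : t0 ∈ l
      · exact ih hmem' (fun x hx => hinj x (List.mem_cons_of_mem _ hx)) _
      · have ha : a = t0 := by
          cases List.mem_cons.mp hmem with
          | inl h => exact h.symm
          | inr h => exact absurd h hmem'
        subst ha
        rw [pvGetD_foldl_insert_untouched l key f (key a) dflt
              (fun x hx h => hmem' (hinj x (List.mem_cons_of_mem _ hx) h ▸ hx)),
            PySem.Dict.getD_insert_self]

-- ===== VERDICT (by name: the statement is the Claim_ definition above) =====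
theorem has_trigrams_feats_spec : Claim_unchanged_has_trigrams_feats := by
  intro document trigr _ hnd
  unfold has_trigrams_feats has_trigrams_feats_alt
  refine congrArg PySem.Dict.items ?_
  apply PySem.List.foldl_congr_mem'
  intro t ht acc
  refine congrArg (acc.insert (pvKey t)) ?_
  apply flag_eq
  intro hlen hwrap
  by_contra hng
  exact hnd ⟨hlen, t, ht, hwrap, hng⟩

theorem has_trigrams_feats_changed : Claim_changed_has_trigrams_feats := by
  unfold Claim_changed_has_trigrams_feats; decide

theorem has_trigrams_feats_tight : Claim_exact_has_trigrams_feats := by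
  intro d trigr _ hd heq
  obtain ⟨hlen, t0, hmem, hwrap, hng⟩ := hd
  -- A's flag at t0 is true (the wraparound hit at i = 1)
  have hne : d ≠ [] := by intro h; subst h; simp at hlen
  have hflagA : pvScanA d t0 (PySem.List.pyRange 1 (d.length : Int) 1) = true := by
    rw [pvScanA_eq_any, List.any_eq_true]
    refine ⟨1, ?_, ?_⟩
    · rw [PySem.List.mem_pyRange_one]; omega
    · rw [decide_eq_true_eq, Prod.mk.injEq, Prod.mk.injEq]
      obtain ⟨x, y, z⟩ := t0
      rw [Prod.mk.injEq, Prod.mk.injEq] at hwrap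
      obtain ⟨hx, hy, hz⟩ := hwrap
      refine ⟨?_, ?_, ?_⟩
      · rw [show (1 : Int) - 2 = -1 by norm_num, PySem.List.pyGet?_neg_one]
        cases hgl : d.getLast? with
        | none => exact absurd (List.getLast?_eq_none_iff.mp hgl) hne
        | some w => rw [hx, List.getLastD_eq_getLast?, hgl]; rfl
      · rw [show (1 : Int) - 1 = ((0 : Nat) : Int) by norm_num, PySem.List.pyGet?_natCast,
            hy, List.getD_eq_getElem d "" (by omega), List.getElem?_eq_getElem (by omega)]
      · rw [show (1 : Int) = ((1 : Nat) : Int) by norm_num, PySem.List.pyGet?_natCast,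
            hz, List.getD_eq_getElem d "" (by omega), List.getElem?_eq_getElem (by omega)]
  -- B's flag at t0 is false (t0 does not genuinely occur)
  have hflagB : PySem.Set.contains (pvPresent d) t0 = false := by
    rw [← Bool.not_eq_true, contains_pvPresent]
    rintro ⟨k, h1, h2, h3⟩
    have hk2 : k + 2 < d.length := by
      obtain ⟨h, -⟩ := List.getElem?_eq_some_iff.mp h3
      omega
    refine hng ⟨k, List.mem_range.mpr (by omega), hk2, ?_⟩
    obtain ⟨x, y, z⟩ := t0
    simp only [List.getElem?_eq_getElem (show k < d.length by omega),
      List.getElem?_eq_getElem (show k + 1 < d.length by omega),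
      List.getElem?_eq_getElem (show k + 2 < d.length by omega), Option.some.injEq] at h1 h2 h3
    rw [Prod.mk.injEq, Prod.mk.injEq]
    exact ⟨by rw [List.getD_eq_getElem d "" (by omega), h1],
           by rw [List.getD_eq_getElem d "" (by omega), h2],
           by rw [List.getD_eq_getElem d "" (by omega), h3]⟩
  -- the two result dicts disagree at t0's key
  have hA := pvGetD_foldl_insert_unique trigr pvKey
      (fun t => pvScanA d t (PySem.List.pyRange 1 (d.length : Int) 1)) t0 false hmem
      (fun a _ h => pvKey_inj a t0 h) PySem.Dict.empty
  have hB := pvGetD_foldl_insert_unique trigr pvKey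
      (fun t => PySem.Set.contains (pvPresent d) t) t0 false hmem
      (fun a _ h => pvKey_inj a t0 h) PySem.Dict.empty
  rw [hflagA] at hA
  rw [hflagB] at hB
  have hglue := congrArg (fun dd : PySem.Dict String Bool => dd.getD (pvKey t0) false)
      (PySem.Dict.ext heq)
  exact absurd ((hA.symm.trans hglue).trans hB) (by simp)
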